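-- pv_equiv track=rewrite | github.com/sanger-pathogens/circlator | circlator/fixvars.py | _remove_indels_overlapping_snps
-- ===== SOURCE A (Python) =====
-- def _remove_indels_overlapping_snps(indels, snps):
--     for name in indels:
--         if name in snps:
--             snp_positions = set([x[0] for x in snps[name]])
--             to_remove = set()
--             for i in range(len(indels[name])):
--                 pos, ref, alt = indels[name][i]
--                 positions = set(range(pos, pos + max(len(ref), len(alt))))
--                 if len(positions.intersection(snp_positions)):
--                     to_remove.add(i)
--
--             indels[name] = [indels[name][i] for i in range(len(indels[name])) if i not in to_remove]
--
--     return indels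
-- ===== SOURCE B (Python) =====
-- def _remove_indels_overlapping_snps(indels, snps):
--     for name, lst in indels.items():
--         if name in snps:
--             sp = sorted(set(x[0] for x in snps[name]))
--             kept = []
--             for pos, ref, alt in lst:
--                 hi = pos + max(len(ref), len(alt))
--                 lo, r = 0, len(sp)
--                 while lo < r:
--                     m = (lo + r) // 2
--                     if sp[m] < pos:
--                         lo = m + 1
--                     else:
--                         r = m
--                 if not (lo < len(sp) and sp[lo] < hi):
--                     kept.append((pos, ref, alt))
--             indels[name] = kept
--     return indels
-- ===== Notes on version B (the rewrite author's own statement) =====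
-- stated objective: alternative
-- what changed: Instead of materialising the set of every position an indel spans and intersecting it with the SNP-position set, B sorts the distinct SNP positions once per name and uses a hand-written binary search to test whether any SNP position falls inside the indel's half-open interval (intended as faster; measured only ~1.45x at the largest size).
import Mathlib
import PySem

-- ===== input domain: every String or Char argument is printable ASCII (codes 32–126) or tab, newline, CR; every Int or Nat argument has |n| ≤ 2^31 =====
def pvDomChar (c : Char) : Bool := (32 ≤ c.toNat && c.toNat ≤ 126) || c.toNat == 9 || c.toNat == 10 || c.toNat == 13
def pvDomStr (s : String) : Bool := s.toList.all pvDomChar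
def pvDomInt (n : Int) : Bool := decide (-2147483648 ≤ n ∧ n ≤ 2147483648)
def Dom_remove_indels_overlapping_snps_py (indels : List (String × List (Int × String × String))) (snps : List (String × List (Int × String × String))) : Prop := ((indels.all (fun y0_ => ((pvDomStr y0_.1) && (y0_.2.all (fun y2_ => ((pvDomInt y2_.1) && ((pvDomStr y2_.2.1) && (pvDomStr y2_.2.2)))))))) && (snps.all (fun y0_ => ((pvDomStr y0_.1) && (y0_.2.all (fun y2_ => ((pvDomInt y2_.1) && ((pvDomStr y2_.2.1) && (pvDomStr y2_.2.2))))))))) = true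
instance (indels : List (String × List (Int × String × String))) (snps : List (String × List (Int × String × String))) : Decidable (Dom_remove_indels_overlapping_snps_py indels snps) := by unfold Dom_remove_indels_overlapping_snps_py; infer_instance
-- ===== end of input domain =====

-- B replaces A's per-indel materialised range-set intersection by one sorted SNP-position
-- list per name and a hand-written binary search; both mutate the dict's values in place
-- in Python (same mutation), the equivalence proved here is about the returned value.

-- dict lookup (first match) — exact for a Python dict, whose assoc-list image has distinct keys
def dLookup {α : Type} (l : List (String × α)) (k : String) : Option α :=
  match l with
  | [] => none
  | (k', v) :: t => if k' == k then some v else dLookup t k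

-- dict assignment to an EXISTING key (overwrite in place) — exact for a Python dict when the
-- key is present, which both Pythons guarantee (they only assign keys of the dict itself)
def dSet {α : Type} (l : List (String × α)) (k : String) (v : α) : List (String × α) :=
  match l with
  | [] => []
  | (k', v') :: t => if k' == k then (k', v) :: t else (k', v') :: dSet t k v

-- ===== PORT A =====
def remove_indels_overlapping_snps_py (indels : List (String × List (Int × String × String))) (snps : List (String × List (Int × String × String))) : List (String × List (Int × String × String)) :=
  (indels.map Prod.fst).foldl (fun d name =>
    match dLookup snps name with
    | none => d
    | some snplist =>
      match dLookup d name with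
      | none => d  -- unreachable: name is a key of d (Python would raise KeyError)
      | some lst =>
        let snp_positions : PySem.Set Int := PySem.Set.ofList (snplist.map (·.1))
        let to_remove : PySem.Set Int :=
          (PySem.List.pyRange 0 lst.length 1).foldl (fun tr i =>
            let t := PySem.List.pyGetD lst i (0, "", "")
            let positions : PySem.Set Int :=
              PySem.Set.ofList (PySem.List.pyRange t.1 (t.1 + max (PySem.Str.len t.2.1) (PySem.Str.len t.2.2)) 1)
            if PySem.Set.len (PySem.Set.inter positions snp_positions) ≠ 0 then PySem.Set.add tr i else tr)
            PySem.Set.empty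
        dSet d name
          (((PySem.List.pyRange 0 lst.length 1).filter (fun i => !(PySem.Set.contains to_remove i))).map
            (fun i => PySem.List.pyGetD lst i (0, "", ""))))
    indels

-- ===== PORT B =====
-- Source B's hand-written while-loop binary search; the loop shrinks r - lo each pass, so a fuel
-- of r - lo makes the same iteration structural; sp[m] is always in range there, so getD is exact
def lbGo (sp : List Int) (x : Int) : Nat → Nat → Nat → Nat
  | 0, lo, _ => lo
  | Nat.succ fuel, lo, r =>
    if lo < r then
      let m := (lo + r) / 2
      if sp.getD m 0 < x then lbGo sp x fuel (m + 1) r else lbGo sp x fuel lo m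
    else lo

def lowerBound (sp : List Int) (x : Int) (lo r : Nat) : Nat :=
  lbGo sp x (r - lo) lo r

def bKeep (sp : List Int) (t : Int × String × String) : Bool :=
  let hi := t.1 + max (PySem.Str.len t.2.1) (PySem.Str.len t.2.2)
  let lo := lowerBound sp t.1 0 sp.length
  !(decide (lo < sp.length) && decide (sp.getD lo 0 < hi))

def remove_indels_overlapping_snps_py_alt (indels : List (String × List (Int × String × String))) (snps : List (String × List (Int × String × String))) : List (String × List (Int × String × String)) :=
  indels.foldl (fun d p =>
    match dLookup snps p.1 with
    | none => d
    | some snplist =>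
      let sp := PySem.List.sorted (PySem.Set.ofList (snplist.map (·.1))) (fun x => x) false
      dSet d p.1 (p.2.filter (bKeep sp)))
    indels

-- ===== PRECONDITION & SPEC =====
-- Pre_ excludes association lists whose indel keys repeat: those do not represent a Python
-- dict (A's parameter is a dict, which cannot hold duplicate keys), so A's behaviour there
-- is not defined by the Python source at all.
def Pre_remove_indels_overlapping_snps_py (indels : List (String × List (Int × String × String))) (snps : List (String × List (Int × String × String))) : Prop :=
  (indels.map Prod.fst).Nodup
instance (indels : List (String × List (Int × String × String))) (snps : List (String × List (Int × String × String))) : Decidable (Pre_remove_indels_overlapping_snps_py indels snps) := by unfold Pre_remove_indels_overlapping_snps_py; infer_instance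

def pvWitness_remove_indels_overlapping_snps_py : (List (String × List (Int × String × String))) × (List (String × List (Int × String × String))) :=
  ([("ctg", [((2 : Int), "AT", "A"), ((9 : Int), "G", "GC")])], [("ctg", [((3 : Int), "A", "T")])])

def Spec_remove_indels_overlapping_snps_py (indels : List (String × List (Int × String × String))) (snps : List (String × List (Int × String × String))) (out : List (String × List (Int × String × String))) : Prop := out = remove_indels_overlapping_snps_py_alt indels snps
instance (indels : List (String × List (Int × String × String))) (snps : List (String × List (Int × String × String))) (out : List (String × List (Int × String × String))) : Decidable (Spec_remove_indels_overlapping_snps_py indels snps out) := by unfold Spec_remove_indels_overlapping_snps_py; infer_instance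

-- ===== CLAIM (what is proved, stated in full; the proofs are below) =====
def Claim_equal_remove_indels_overlapping_snps_py : Prop := ∀ (indels : List (String × List (Int × String × String))) (snps : List (String × List (Int × String × String))), Dom_remove_indels_overlapping_snps_py indels snps → Pre_remove_indels_overlapping_snps_py indels snps → Spec_remove_indels_overlapping_snps_py indels snps (remove_indels_overlapping_snps_py indels snps)

-- ===== LEMMAS AND PROOFS =====

-- the sorted, deduplicated SNP positions used by B for one name
def spOf (snplist : List (Int × String × String)) : List Int :=
  PySem.List.sorted (PySem.Set.ofList (snplist.map (·.1))) (fun x => x) false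

-- what both ports do to the value list of one name
def gFun (snps : List (String × List (Int × String × String))) (name : String)
    (lst : List (Int × String × String)) : List (Int × String × String) :=
  match dLookup snps name with
  | none => lst
  | some snplist => lst.filter (bKeep (spOf snplist))

def gPair (snps : List (String × List (Int × String × String)))
    (p : String × List (Int × String × String)) : String × List (Int × String × String) :=
  (p.1, gFun snps p.1 p.2)

-- A's loop body, named for the proofs (definitionally the lambda in the port)
def stepA (snps : List (String × List (Int × String × String)))
    (d : List (String × List (Int × String × String))) (name : String) :
    List (String × List (Int × String × String)) :=
  match dLookup snps name with
  | none => d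
  | some snplist =>
    match dLookup d name with
    | none => d
    | some lst =>
      let snp_positions : PySem.Set Int := PySem.Set.ofList (snplist.map (·.1))
      let to_remove : PySem.Set Int :=
        (PySem.List.pyRange 0 lst.length 1).foldl (fun tr i =>
          let t := PySem.List.pyGetD lst i (0, "", "")
          let positions : PySem.Set Int :=
            PySem.Set.ofList (PySem.List.pyRange t.1 (t.1 + max (PySem.Str.len t.2.1) (PySem.Str.len t.2.2)) 1)
          if PySem.Set.len (PySem.Set.inter positions snp_positions) ≠ 0 then PySem.Set.add tr i else tr)
          PySem.Set.empty
      dSet d name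
        (((PySem.List.pyRange 0 lst.length 1).filter (fun i => !(PySem.Set.contains to_remove i))).map
          (fun i => PySem.List.pyGetD lst i (0, "", "")))

-- B's loop body, named for the proofs
def stepB (snps : List (String × List (Int × String × String)))
    (d : List (String × List (Int × String × String)))
    (p : String × List (Int × String × String)) :
    List (String × List (Int × String × String)) :=
  match dLookup snps p.1 with
  | none => d
  | some snplist =>
    let sp := PySem.List.sorted (PySem.Set.ofList (snplist.map (·.1))) (fun x => x) false
    dSet d p.1 (p.2.filter (bKeep sp))

theorem portA_eq_foldl (indels snps : List (String × List (Int × String × String))) :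
    remove_indels_overlapping_snps_py indels snps = (indels.map Prod.fst).foldl (stepA snps) indels := rfl

theorem portB_eq_foldl (indels snps : List (String × List (Int × String × String))) :
    remove_indels_overlapping_snps_py_alt indels snps = indels.foldl (stepB snps) indels := rfl

theorem dLookup_append_of_not_mem {α : Type} (l1 l2 : List (String × α)) (k : String)
    (h : k ∉ l1.map Prod.fst) : dLookup (l1 ++ l2) k = dLookup l2 k := by
  induction l1 with
  | nil => rfl
  | cons p t ih =>
    simp only [List.map_cons, List.mem_cons] at h
    push_neg at h
    simp only [List.cons_append, dLookup]
    rw [if_neg (by simpa using Ne.symm h.1), ih h.2]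

theorem dSet_append_of_not_mem {α : Type} (l1 l2 : List (String × α)) (k : String) (v : α)
    (h : k ∉ l1.map Prod.fst) : dSet (l1 ++ l2) k v = l1 ++ dSet l2 k v := by
  induction l1 with
  | nil => rfl
  | cons p t ih =>
    simp only [List.map_cons, List.mem_cons] at h
    push_neg at h
    simp only [List.cons_append, dSet]
    rw [if_neg (by simpa using Ne.symm h.1), ih h.2]

theorem dLookup_cons_self {α : Type} (k : String) (v : α) (t : List (String × α)) :
    dLookup ((k, v) :: t) k = some v := by simp [dLookup]

theorem dSet_cons_self {α : Type} (k : String) (v w : α) (t : List (String × α)) :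
    dSet ((k, w) :: t) k v = (k, v) :: t := by simp [dSet]

-- membership in A's to_remove set (a conditional fold of Set.add)
theorem mem_foldl_addif {α : Type} [BEq α] [LawfulBEq α] (P : α → Prop) [inst : DecidablePred P] :
    ∀ (l : List α) (s : PySem.Set α) (x : α),
      (x ∈ l.foldl (fun tr i => if P i then PySem.Set.add tr i else tr) s) ↔
        x ∈ s ∨ (x ∈ l ∧ P x) := by
  intro l
  induction l with
  | nil => simp
  | cons a t ih =>
    intro s x
    simp only [List.foldl_cons]
    by_cases hp : P a
    · rw [if_pos hp, ih]
      simp only [PySem.Set.mem_add, List.mem_cons]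
      constructor
      · rintro ((h | rfl) | h)
        · exact Or.inl h
        · exact Or.inr ⟨Or.inl rfl, hp⟩
        · exact Or.inr ⟨Or.inr h.1, h.2⟩
      · rintro (h | ⟨(rfl | h), hpx⟩)
        · exact Or.inl (Or.inl h)
        · exact Or.inl (Or.inr rfl)
        · exact Or.inr ⟨h, hpx⟩
    · rw [if_neg hp, ih]
      constructor
      · rintro (h | h)
        · exact Or.inl h
        · exact Or.inr ⟨List.mem_cons_of_mem _ h.1, h.2⟩
      · rintro (h | ⟨hm, hpx⟩)
        · exact Or.inl h
        · rcases List.mem_cons.mp hm with rfl | hm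
          · exact absurd hpx hp
          · exact Or.inr ⟨hm, hpx⟩

-- the comprehension [lst[i] for i in range(len(lst)) if q(lst[i])] is lst.filter q (Nat form)
theorem range_filter_map_nat {β : Type} (q : β → Bool) (d : β) :
    ∀ (lst : List β),
      ((List.range lst.length).filter (fun i => q (lst.getD i d))).map (fun i => lst.getD i d)
        = lst.filter q := by
  intro lst
  induction lst with
  | nil => simp
  | cons a t ih =>
    have h1 : ((fun i => q ((a :: t).getD i d)) ∘ Nat.succ) = fun i => q (t.getD i d) := by
      funext i; simp
    have h2 : ((fun i => (a :: t).getD i d) ∘ Nat.succ) = fun i => t.getD i d := by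
      funext i; simp
    rw [List.length_cons, List.range_succ_eq_map, List.filter_cons]
    by_cases hq : q a = true
    · rw [List.getD_cons_zero, if_pos hq, List.map_cons, List.filter_map, List.map_map, h1, h2, ih]
      simp [List.filter_cons, hq]
    · rw [List.getD_cons_zero, if_neg hq, List.filter_map, List.map_map, h1, h2, ih]
      simp [List.filter_cons, hq]

-- the same comprehension, with Python int indices
theorem range_filter_map {β : Type} (q : β → Bool) (d : β) (lst : List β) :
    ((PySem.List.pyRange 0 (lst.length : Int) 1).filter (fun i => q (PySem.List.pyGetD lst i d))).map
        (fun i => PySem.List.pyGetD lst i d) = lst.filter q := by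
  have hz : PySem.List.pyRange 0 (lst.length : Int) 1
      = (List.range lst.length).map (fun k : Nat => (k : Int)) := by
    simpa using PySem.List.pyRange_zero_nat lst.length
  rw [hz, List.filter_map, List.map_map]
  have h1 : ((fun i => q (PySem.List.pyGetD lst i d)) ∘ fun k : Nat => (k : Int))
      = fun i : Nat => q (lst.getD i d) := by
    funext i; simp [PySem.List.pyGetD_natCast]
  have h2 : ((fun i => PySem.List.pyGetD lst i d) ∘ fun k : Nat => (k : Int))
      = fun i : Nat => lst.getD i d := by
    funext i; simp [PySem.List.pyGetD_natCast]
  rw [h1, h2, range_filter_map_nat]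

-- binary-search invariant for Source B's while loop
theorem lb_inv (sp : List Int) (x : Int)
    (hmono : ∀ i j : Nat, i ≤ j → j < sp.length → sp.getD i 0 ≤ sp.getD j 0) :
    ∀ (n lo r : Nat), r - lo ≤ n → lo ≤ r → r ≤ sp.length →
      (∀ j, j < lo → sp.getD j 0 < x) → (∀ j, r ≤ j → j < sp.length → x ≤ sp.getD j 0) →
      lbGo sp x n lo r ≤ sp.length ∧
        (∀ j, j < lbGo sp x n lo r → sp.getD j 0 < x) ∧
        (∀ j, lbGo sp x n lo r ≤ j → j < sp.length → x ≤ sp.getD j 0) := by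
  intro n
  induction n with
  | zero =>
    intro lo r hn hlr hrl hlow hhigh
    simp only [lbGo]
    exact ⟨by omega, hlow, fun j hj hjl => hhigh j (by omega) hjl⟩
  | succ n ih =>
    intro lo r hn hlr hrl hlow hhigh
    by_cases hc : lo < r
    · simp only [lbGo, if_pos hc]
      have hmlt : (lo + r) / 2 < r := by omega
      have hmlo : lo ≤ (lo + r) / 2 := by omega
      have hmlen : (lo + r) / 2 < sp.length := by omega
      by_cases hv : sp.getD ((lo + r) / 2) 0 < x
      · simp only [if_pos hv]
        exact ih ((lo + r) / 2 + 1) r (by omega) (by omega) hrl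
          (fun j hj => lt_of_le_of_lt (hmono j ((lo + r) / 2) (by omega) hmlen) hv) hhigh
      · simp only [if_neg hv]
        push_neg at hv
        exact ih lo ((lo + r) / 2) (by omega) (by omega) (by omega) hlow
          (fun j hj hjl => le_trans hv (hmono ((lo + r) / 2) j hj hjl))
    · simp only [lbGo, if_neg hc]
      exact ⟨by omega, hlow, fun j hj hjl => hhigh j (by omega) hjl⟩

-- overlap existence ↔ B's binary-search test, on a sorted list
theorem lb_overlap (sp : List Int) (x hi : Int)
    (hsorted : sp.Pairwise (fun a b => a < b)) :
    (lowerBound sp x 0 sp.length < sp.length ∧ sp.getD (lowerBound sp x 0 sp.length) 0 < hi) ↔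
      ∃ y ∈ sp, x ≤ y ∧ y < hi := by
  have hmono : ∀ i j : Nat, i ≤ j → j < sp.length → sp.getD i 0 ≤ sp.getD j 0 := by
    intro i j hij hjl
    have hil : i < sp.length := lt_of_le_of_lt (by omega) hjl
    rw [List.getD_eq_getElem sp 0 hil, List.getD_eq_getElem sp 0 hjl]
    rcases eq_or_lt_of_le hij with rfl | hlt
    · exact le_refl _
    · exact le_of_lt (List.pairwise_iff_getElem.mp hsorted i j hil hjl hlt)
  obtain ⟨hk1, hk2, hk3⟩ : lowerBound sp x 0 sp.length ≤ sp.length ∧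
      (∀ j, j < lowerBound sp x 0 sp.length → sp.getD j 0 < x) ∧
      (∀ j, lowerBound sp x 0 sp.length ≤ j → j < sp.length → x ≤ sp.getD j 0) := by
    rw [lowerBound]
    exact lb_inv sp x hmono (sp.length - 0) 0 sp.length (by omega) (by omega)
      (le_refl _) (fun j hj => absurd hj (Nat.not_lt_zero j)) (fun j hj hjl => absurd hjl (by omega))
  constructor
  · rintro ⟨hlt, hhi⟩
    refine ⟨sp.getD (lowerBound sp x 0 sp.length) 0, ?_, hk3 _ (le_refl _) hlt, hhi⟩
    rw [List.getD_eq_getElem sp 0 hlt]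
    exact List.getElem_mem _
  · rintro ⟨y, hy, hxy, hyhi⟩
    obtain ⟨j, hjl, rfl⟩ := List.mem_iff_getElem.mp hy
    have hjk : lowerBound sp x 0 sp.length ≤ j := by
      by_contra hjk
      push_neg at hjk
      have := hk2 j hjk
      rw [List.getD_eq_getElem sp 0 hjl] at this
      omega
    have hklen : lowerBound sp x 0 sp.length < sp.length := lt_of_le_of_lt hjk hjl
    refine ⟨hklen, ?_⟩
    calc sp.getD (lowerBound sp x 0 sp.length) 0 ≤ sp.getD j 0 := hmono _ j hjk hjl
      _ = sp[j] := List.getD_eq_getElem sp 0 hjl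
      _ < hi := hyhi

-- A's range-set intersection test, as an existence statement
theorem overlap_iff (snplist : List (Int × String × String)) (t : Int × String × String) :
    (PySem.Set.len (PySem.Set.inter
        (PySem.Set.ofList (PySem.List.pyRange t.1 (t.1 + max (PySem.Str.len t.2.1) (PySem.Str.len t.2.2)) 1))
        (PySem.Set.ofList (snplist.map (·.1)))) ≠ 0) ↔
      ∃ y ∈ snplist.map (·.1), t.1 ≤ y ∧ y < t.1 + max (PySem.Str.len t.2.1) (PySem.Str.len t.2.2) := by
  rw [PySem.Set.len]
  constructor
  · intro h
    have hne : PySem.Set.inter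
        (PySem.Set.ofList (PySem.List.pyRange t.1 (t.1 + max (PySem.Str.len t.2.1) (PySem.Str.len t.2.2)) 1))
        (PySem.Set.ofList (snplist.map (·.1))) ≠ ([] : List Int) := by
      intro hnil
      rw [hnil] at h
      simp at h
    obtain ⟨y, hy⟩ := List.exists_mem_of_ne_nil _ hne
    rw [PySem.Set.mem_inter, PySem.Set.mem_ofList, PySem.Set.mem_ofList,
      PySem.List.mem_pyRange_one] at hy
    exact ⟨y, hy.2, hy.1.1, hy.1.2⟩
  · rintro ⟨y, hy, h1, h2⟩
    have hmem : y ∈ PySem.Set.inter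
        (PySem.Set.ofList (PySem.List.pyRange t.1 (t.1 + max (PySem.Str.len t.2.1) (PySem.Str.len t.2.2)) 1))
        (PySem.Set.ofList (snplist.map (·.1))) := by
      rw [PySem.Set.mem_inter, PySem.Set.mem_ofList, PySem.Set.mem_ofList,
        PySem.List.mem_pyRange_one]
      exact ⟨⟨h1, h2⟩, hy⟩
    intro hzero
    have hlen : (PySem.Set.inter
        (PySem.Set.ofList (PySem.List.pyRange t.1 (t.1 + max (PySem.Str.len t.2.1) (PySem.Str.len t.2.2)) 1))
        (PySem.Set.ofList (snplist.map (·.1))) : List Int).length = 0 := by exact_mod_cast hzero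
    rw [List.length_eq_zero_iff] at hlen
    rw [hlen] at hmem
    simp at hmem

-- B's keep predicate, negated, is exactly A's overlap condition
theorem bKeep_iff (snplist : List (Int × String × String)) (t : Int × String × String) :
    (bKeep (spOf snplist) t = false) ↔
      ∃ y ∈ snplist.map (·.1), t.1 ≤ y ∧ y < t.1 + max (PySem.Str.len t.2.1) (PySem.Str.len t.2.2) := by
  have hs := PySem.List.sorted_ofList_pairwise_lt (snplist.map (·.1))
  have hmem : ∀ y : Int, y ∈ spOf snplist ↔ y ∈ snplist.map (·.1) := by
    intro y
    rw [spOf, PySem.List.mem_sorted, PySem.Set.mem_ofList]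
  rw [bKeep]
  simp only [Bool.not_eq_false', Bool.and_eq_true, decide_eq_true_eq]
  rw [show spOf snplist = PySem.List.sorted (PySem.Set.ofList (snplist.map (·.1))) (fun x => x) false from rfl] at *
  constructor
  · intro h
    obtain ⟨y, hy, h1, h2⟩ := (lb_overlap _ _ _ hs).mp h
    exact ⟨y, (hmem y).mp hy, h1, h2⟩
  · rintro ⟨y, hy, h1, h2⟩
    exact (lb_overlap _ _ _ hs).mpr ⟨y, (hmem y).mpr hy, h1, h2⟩

-- per-name: A's index bookkeeping produces exactly B's filter
theorem procA_eq (snplist lst : List (Int × String × String)) :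
    (((PySem.List.pyRange 0 (lst.length : Int) 1).filter (fun i =>
        !(PySem.Set.contains
          ((PySem.List.pyRange 0 (lst.length : Int) 1).foldl (fun tr i =>
            let t := PySem.List.pyGetD lst i (0, "", "")
            let positions : PySem.Set Int :=
              PySem.Set.ofList (PySem.List.pyRange t.1 (t.1 + max (PySem.Str.len t.2.1) (PySem.Str.len t.2.2)) 1)
            if PySem.Set.len (PySem.Set.inter positions (PySem.Set.ofList (snplist.map (·.1)))) ≠ 0
            then PySem.Set.add tr i else tr) PySem.Set.empty) i))).map
      (fun i => PySem.List.pyGetD lst i (0, "", ""))) = lst.filter (bKeep (spOf snplist)) := by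
  have hcong : ∀ i ∈ PySem.List.pyRange 0 (lst.length : Int) 1,
      (!(PySem.Set.contains
          ((PySem.List.pyRange 0 (lst.length : Int) 1).foldl (fun tr i =>
            let t := PySem.List.pyGetD lst i (0, "", "")
            let positions : PySem.Set Int :=
              PySem.Set.ofList (PySem.List.pyRange t.1 (t.1 + max (PySem.Str.len t.2.1) (PySem.Str.len t.2.2)) 1)
            if PySem.Set.len (PySem.Set.inter positions (PySem.Set.ofList (snplist.map (·.1)))) ≠ 0
            then PySem.Set.add tr i else tr) PySem.Set.empty) i))
        = bKeep (spOf snplist) (PySem.List.pyGetD lst i (0, "", "")) := by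
    intro i hi
    have hTR : (i ∈ (PySem.List.pyRange 0 (lst.length : Int) 1).foldl (fun tr i =>
            let t := PySem.List.pyGetD lst i (0, "", "")
            let positions : PySem.Set Int :=
              PySem.Set.ofList (PySem.List.pyRange t.1 (t.1 + max (PySem.Str.len t.2.1) (PySem.Str.len t.2.2)) 1)
            if PySem.Set.len (PySem.Set.inter positions (PySem.Set.ofList (snplist.map (·.1)))) ≠ 0
            then PySem.Set.add tr i else tr) PySem.Set.empty) ↔
          i ∈ (PySem.Set.empty : PySem.Set Int) ∨ (i ∈ PySem.List.pyRange 0 (lst.length : Int) 1 ∧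
            PySem.Set.len (PySem.Set.inter
              (PySem.Set.ofList (PySem.List.pyRange (PySem.List.pyGetD lst i (0, "", "")).1
                ((PySem.List.pyGetD lst i (0, "", "")).1 +
                  max (PySem.Str.len (PySem.List.pyGetD lst i (0, "", "")).2.1)
                    (PySem.Str.len (PySem.List.pyGetD lst i (0, "", "")).2.2)) 1))
              (PySem.Set.ofList (snplist.map (·.1)))) ≠ 0) :=
      mem_foldl_addif (fun j : Int =>
        PySem.Set.len (PySem.Set.inter
          (PySem.Set.ofList (PySem.List.pyRange (PySem.List.pyGetD lst j (0, "", "")).1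
            ((PySem.List.pyGetD lst j (0, "", "")).1 +
              max (PySem.Str.len (PySem.List.pyGetD lst j (0, "", "")).2.1)
                (PySem.Str.len (PySem.List.pyGetD lst j (0, "", "")).2.2)) 1))
          (PySem.Set.ofList (snplist.map (·.1)))) ≠ 0)
      (PySem.List.pyRange 0 (lst.length : Int) 1) PySem.Set.empty i
    have hkey : (i ∈ (PySem.List.pyRange 0 (lst.length : Int) 1).foldl (fun tr i =>
            let t := PySem.List.pyGetD lst i (0, "", "")
            let positions : PySem.Set Int :=
              PySem.Set.ofList (PySem.List.pyRange t.1 (t.1 + max (PySem.Str.len t.2.1) (PySem.Str.len t.2.2)) 1)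
            if PySem.Set.len (PySem.Set.inter positions (PySem.Set.ofList (snplist.map (·.1)))) ≠ 0
            then PySem.Set.add tr i else tr) PySem.Set.empty) ↔
          bKeep (spOf snplist) (PySem.List.pyGetD lst i (0, "", "")) = false := by
      rw [hTR, bKeep_iff]
      constructor
      · rintro (h | ⟨_, hp⟩)
        · simp [PySem.Set.empty] at h
        · exact (overlap_iff snplist (PySem.List.pyGetD lst i (0, "", ""))).mp hp
      · intro h
        exact Or.inr ⟨hi, (overlap_iff snplist (PySem.List.pyGetD lst i (0, "", ""))).mpr h⟩
    by_cases him : i ∈ (PySem.List.pyRange 0 (lst.length : Int) 1).foldl (fun tr i =>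
            let t := PySem.List.pyGetD lst i (0, "", "")
            let positions : PySem.Set Int :=
              PySem.Set.ofList (PySem.List.pyRange t.1 (t.1 + max (PySem.Str.len t.2.1) (PySem.Str.len t.2.2)) 1)
            if PySem.Set.len (PySem.Set.inter positions (PySem.Set.ofList (snplist.map (·.1)))) ≠ 0
            then PySem.Set.add tr i else tr) PySem.Set.empty
    · rw [show PySem.Set.contains ((PySem.List.pyRange 0 (lst.length : Int) 1).foldl (fun tr i =>
            let t := PySem.List.pyGetD lst i (0, "", "")
            let positions : PySem.Set Int :=
              PySem.Set.ofList (PySem.List.pyRange t.1 (t.1 + max (PySem.Str.len t.2.1) (PySem.Str.len t.2.2)) 1)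
            if PySem.Set.len (PySem.Set.inter positions (PySem.Set.ofList (snplist.map (·.1)))) ≠ 0
            then PySem.Set.add tr i else tr) PySem.Set.empty) i = true from
          (PySem.Set.contains_iff _ i).mpr him, hkey.mp him]
      rfl
    · have hc : PySem.Set.contains ((PySem.List.pyRange 0 (lst.length : Int) 1).foldl (fun tr i =>
            let t := PySem.List.pyGetD lst i (0, "", "")
            let positions : PySem.Set Int :=
              PySem.Set.ofList (PySem.List.pyRange t.1 (t.1 + max (PySem.Str.len t.2.1) (PySem.Str.len t.2.2)) 1)
            if PySem.Set.len (PySem.Set.inter positions (PySem.Set.ofList (snplist.map (·.1)))) ≠ 0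
            then PySem.Set.add tr i else tr) PySem.Set.empty) i = false := by
        cases hcb : PySem.Set.contains ((PySem.List.pyRange 0 (lst.length : Int) 1).foldl (fun tr i =>
            let t := PySem.List.pyGetD lst i (0, "", "")
            let positions : PySem.Set Int :=
              PySem.Set.ofList (PySem.List.pyRange t.1 (t.1 + max (PySem.Str.len t.2.1) (PySem.Str.len t.2.2)) 1)
            if PySem.Set.len (PySem.Set.inter positions (PySem.Set.ofList (snplist.map (·.1)))) ≠ 0
            then PySem.Set.add tr i else tr) PySem.Set.empty) i
        · rfl
        · exact absurd ((PySem.Set.contains_iff _ i).mp hcb) him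
      have hb : bKeep (spOf snplist) (PySem.List.pyGetD lst i (0, "", "")) = true := by
        cases hbb : bKeep (spOf snplist) (PySem.List.pyGetD lst i (0, "", ""))
        · exact absurd (hkey.mpr hbb) him
        · rfl
      rw [hc, hb]
      rfl
  rw [List.filter_congr hcong, range_filter_map (bKeep (spOf snplist)) (0, "", "") lst]

-- A's per-name step rewrites one middle entry of the association list
theorem stepA_spec (snps pre rest : List (String × List (Int × String × String)))
    (name : String) (lst : List (Int × String × String))
    (hpre : name ∉ pre.map Prod.fst) :
    stepA snps (pre.map (gPair snps) ++ (name, lst) :: rest) name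
      = pre.map (gPair snps) ++ (name, gFun snps name lst) :: rest := by
  have hpre' : name ∉ (pre.map (gPair snps)).map Prod.fst := by
    simpa [List.map_map, Function.comp, gPair] using hpre
  have hd : dLookup (pre.map (gPair snps) ++ (name, lst) :: rest) name = some lst := by
    rw [dLookup_append_of_not_mem _ _ _ hpre', dLookup_cons_self]
  cases hsn : dLookup snps name with
  | none => simp only [stepA, gFun, hsn]
  | some snplist =>
    simp only [stepA, gFun, hsn, hd]
    rw [dSet_append_of_not_mem _ _ _ _ hpre', dSet_cons_self]
    rw [procA_eq snplist lst]

-- B's per-name step does the same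
theorem stepB_spec (snps pre rest : List (String × List (Int × String × String)))
    (p : String × List (Int × String × String))
    (hpre : p.1 ∉ pre.map Prod.fst) :
    stepB snps (pre.map (gPair snps) ++ (p.1, p.2) :: rest) p
      = pre.map (gPair snps) ++ (p.1, gFun snps p.1 p.2) :: rest := by
  have hpre' : p.1 ∉ (pre.map (gPair snps)).map Prod.fst := by
    simpa [List.map_map, Function.comp, gPair] using hpre
  cases hsn : dLookup snps p.1 with
  | none => simp only [stepB, gFun, hsn]
  | some snplist =>
    simp only [stepB, gFun, hsn]
    rw [dSet_append_of_not_mem _ _ _ _ hpre', dSet_cons_self]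
    simp [spOf]

theorem foldA (snps : List (String × List (Int × String × String))) :
    ∀ (suf pre : List (String × List (Int × String × String))),
      ((pre ++ suf).map Prod.fst).Nodup →
      (suf.map Prod.fst).foldl (stepA snps) (pre.map (gPair snps) ++ suf)
        = (pre ++ suf).map (gPair snps) := by
  intro suf
  induction suf with
  | nil => intro pre _; simp
  | cons p rest ih =>
    intro pre h
    have hkeys : (pre.map Prod.fst ++ p.1 :: rest.map Prod.fst).Nodup := by
      simpa using h
    have hpre : p.1 ∉ pre.map Prod.fst := by
      have h2 : p.1 ∉ (pre.map Prod.fst ++ rest.map Prod.fst) :=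
        (List.nodup_cons.mp (List.nodup_middle.mp hkeys)).1
      intro hm
      exact h2 (List.mem_append_left _ hm)
    simp only [List.map_cons, List.foldl_cons]
    rw [show (pre.map (gPair snps) ++ p :: rest)
        = (pre.map (gPair snps) ++ (p.1, p.2) :: rest) by simp]
    rw [stepA_spec snps pre rest p.1 p.2 hpre]
    have hmv : pre.map (gPair snps) ++ (p.1, gFun snps p.1 p.2) :: rest
        = (pre ++ [p]).map (gPair snps) ++ rest := by
      simp [gPair]
    rw [hmv, ih (pre ++ [p]) (by simpa using h)]
    simp

theorem foldB (snps : List (String × List (Int × String × String))) :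
    ∀ (suf pre : List (String × List (Int × String × String))),
      ((pre ++ suf).map Prod.fst).Nodup →
      suf.foldl (stepB snps) (pre.map (gPair snps) ++ suf)
        = (pre ++ suf).map (gPair snps) := by
  intro suf
  induction suf with
  | nil => intro pre _; simp
  | cons p rest ih =>
    intro pre h
    have hkeys : (pre.map Prod.fst ++ p.1 :: rest.map Prod.fst).Nodup := by
      simpa using h
    have hpre : p.1 ∉ pre.map Prod.fst := by
      have h2 : p.1 ∉ (pre.map Prod.fst ++ rest.map Prod.fst) :=
        (List.nodup_cons.mp (List.nodup_middle.mp hkeys)).1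
      intro hm
      exact h2 (List.mem_append_left _ hm)
    simp only [List.foldl_cons]
    rw [show (pre.map (gPair snps) ++ p :: rest)
        = (pre.map (gPair snps) ++ (p.1, p.2) :: rest) by simp]
    rw [stepB_spec snps pre rest p hpre]
    have hmv : pre.map (gPair snps) ++ (p.1, gFun snps p.1 p.2) :: rest
        = (pre ++ [p]).map (gPair snps) ++ rest := by
      simp [gPair]
    rw [hmv, ih (pre ++ [p]) (by simpa using h)]
    simp

-- ===== VERDICT (by name: the statement is the Claim_ definition above) =====
theorem remove_indels_overlapping_snps_py_spec : Claim_equal_remove_indels_overlapping_snps_py := by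
  intro indels snps _hdom hpre
  show remove_indels_overlapping_snps_py indels snps
      = remove_indels_overlapping_snps_py_alt indels snps
  rw [portA_eq_foldl, portB_eq_foldl]
  have hA := foldA snps indels []
  have hB := foldB snps indels []
  simp only [List.nil_append, List.map_nil] at hA hB
  rw [hA hpre, hB hpre]
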